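-- pv_equiv track=rewrite | github.com/MadiKaliyev/KaliyevMadi | Home Work 8/DZ 8 zadacha 2 sortirovka.py | KthAppearcance
-- ===== SOURCE A (Python) =====
-- def KthAppearcance(A,a,k):
--     count = 0
--     for i in range(len(A)):
--         if A[i] == a:
--             count += 1
--             if count == k:
--                 return i
--     return -1
-- ===== SOURCE B (Python) =====
-- def KthAppearcance(A, a, k):
--     # Recursive decomposition: split off the first occurrence (found by list.index)
--     # and recurse on the remaining suffix with k-1, rebasing the returned index.
--     if k < 1 or a not in A:
--         return -1
--     i = A.index(a)
--     if k == 1: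
--         return i
--     r = KthAppearcance(A[i + 1:], a, k - 1)
--     return -1 if r == -1 else i + 1 + r
-- ===== Notes on version B (the rewrite author's own statement) =====
-- stated objective: alternative
-- what changed: Replaced the single-pass running-counter loop by a divide-and-conquer recursion: locate the first occurrence with list.index, then recurse on the suffix after it with k-1 and rebase the returned index; no counter variable and no explicit element loop remain.
import Mathlib
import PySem

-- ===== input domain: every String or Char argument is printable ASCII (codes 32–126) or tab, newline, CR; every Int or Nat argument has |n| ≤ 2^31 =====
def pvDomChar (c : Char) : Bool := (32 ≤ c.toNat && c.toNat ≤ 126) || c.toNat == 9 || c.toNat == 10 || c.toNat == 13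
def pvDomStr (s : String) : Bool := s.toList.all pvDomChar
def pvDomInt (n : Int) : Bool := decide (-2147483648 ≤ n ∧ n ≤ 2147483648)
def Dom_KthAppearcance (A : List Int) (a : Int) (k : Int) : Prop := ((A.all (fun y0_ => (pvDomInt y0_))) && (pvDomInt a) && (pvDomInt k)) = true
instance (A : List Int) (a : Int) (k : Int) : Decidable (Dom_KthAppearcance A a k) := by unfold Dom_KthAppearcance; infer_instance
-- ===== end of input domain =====

-- B replaces A's running-counter scan by a divide-and-conquer recursion: find the
-- first occurrence with list.index, recurse on the suffix after it with k-1 and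
-- rebase the returned index; same O(n) cost, genuinely different decomposition.

-- ===== PORT A =====
def KthAGo : List Int → Int → Int → Int → Int → Int
  | [], _, _, _, _ => -1
  | x :: xs, a, k, i, count =>
    if x = a then
      if count + 1 = k then i else KthAGo xs a k (i + 1) (count + 1)
    else KthAGo xs a k (i + 1) count

def KthAppearcance (A : List Int) (a : Int) (k : Int) : Int :=
  KthAGo A a k 0 0

-- ===== PORT B =====
-- recursion on the first occurrence; A.index(a) → PySem.List.index? (guarded by a ∈ A,
-- so the none branch is unreachable); A[i+1:] → List.drop (i+1)
def KthAppearcance_alt (A : List Int) (a : Int) (k : Int) : Int :=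
  if k < 1 ∨ a ∉ A then -1
  else
    match PySem.List.index? A a with
    | none => -1
    | some i =>
      if k = 1 then (i : Int)
      else
        let r := KthAppearcance_alt (A.drop (i + 1)) a (k - 1)
        if r = -1 then -1 else (i : Int) + 1 + r
termination_by k.toNat
decreasing_by omega

-- ===== PRECONDITION & SPEC =====
def Spec_KthAppearcance (A : List Int) (a : Int) (k : Int) (out : Int) : Prop := out = KthAppearcance_alt A a k
instance (A : List Int) (a : Int) (k : Int) (out : Int) : Decidable (Spec_KthAppearcance A a k out) := by unfold Spec_KthAppearcance; infer_instance

-- ===== CLAIM (what is proved, stated in full; the proofs are below) =====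
def Claim_equal_KthAppearcance : Prop := ∀ (A : List Int) (a : Int) (k : Int), Dom_KthAppearcance A a k → Spec_KthAppearcance A a k (KthAppearcance A a k)

-- ===== LEMMAS AND PROOFS =====

-- proof-only helper: the list of positions of a in xs, offset by j
def KthOcc : List Int → Int → Int → List Int
  | [], _, _ => []
  | x :: xs, a, j => if x = a then j :: KthOcc xs a (j + 1) else KthOcc xs a (j + 1)

lemma KthOcc_mem_ge (xs : List Int) (a j x : Int) (hx : x ∈ KthOcc xs a j) : j ≤ x := by
  induction xs generalizing j with
  | nil => simp [KthOcc] at hx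
  | cons y ys ih =>
    simp only [KthOcc] at hx
    split at hx
    · rcases List.mem_cons.mp hx with h | h
      · omega
      · have := ih (j + 1) h; omega
    · have := ih (j + 1) hx; omega

lemma KthOcc_of_not_mem (xs : List Int) (a j : Int) (h : a ∉ xs) : KthOcc xs a j = [] := by
  induction xs generalizing j with
  | nil => rfl
  | cons y ys ih =>
    simp only [List.mem_cons, not_or] at h
    simp [KthOcc, Ne.symm h.1, ih _ h.2]

lemma KthOcc_shift (xs : List Int) (a j : Int) :
    KthOcc xs a j = (KthOcc xs a 0).map (· + j) := by
  induction xs generalizing j with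
  | nil => simp [KthOcc]
  | cons y ys ih =>
    have hmap : ∀ L : List Int,
        List.map (fun x => x + (j + 1)) L
          = List.map (fun x => x + j) (List.map (fun x => x + (0 + 1)) L) := by
      intro L
      rw [List.map_map]
      apply List.map_congr_left
      intro x _
      simp only [Function.comp_apply]
      ring
    simp only [KthOcc]
    rw [ih (j + 1), ih (0 + 1)]
    split
    · simp [hmap]
    · simp [hmap]

lemma KthOcc_split (xs : List Int) (a : Int) (i : Nat)
    (hidx : PySem.List.index? xs a = some i) :
    KthOcc xs a 0 = (i : Int) :: KthOcc (xs.drop (i + 1)) a ((i : Int) + 1) := by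
  induction xs generalizing i with
  | nil => simp [PySem.List.index?_eq_idxOf?] at hidx
  | cons y ys ih =>
    by_cases hy : y = a
    · subst hy
      rw [PySem.List.index?_cons_self] at hidx
      cases hidx
      simp [KthOcc]
    · rw [PySem.List.index?_cons_of_ne ys hy] at hidx
      rcases Option.map_eq_some_iff.mp hidx with ⟨i', hi', rfl⟩
      simp only [KthOcc, hy, if_false]
      have hdrop : List.drop (i' + 1 + 1) (y :: ys) = List.drop (i' + 1) ys := by
        simp [List.drop_succ_cons]
      rw [hdrop]
      rw [KthOcc_shift ys a (0 + 1), ih i' hi', List.map_cons,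
          KthOcc_shift (ys.drop (i' + 1)) a ((i' : Int) + 1),
          KthOcc_shift (ys.drop (i' + 1)) a (((i' + 1 : Nat) : Int) + 1),
          List.map_map]
      refine List.cons_eq_cons.mpr ⟨by push_cast; ring, ?_⟩
      apply List.map_congr_left
      intro x _
      simp only [Function.comp_apply]
      push_cast
      ring

-- characterization of A's loop via the occurrence list
lemma KthAGo_eq (xs : List Int) (a k i c : Int) :
    KthAGo xs a k i c =
      if c < k then ((KthOcc xs a i)[(k - c - 1).toNat]?).getD (-1) else -1 := by
  induction xs generalizing i c with
  | nil => simp [KthAGo, KthOcc]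
  | cons x xs ih =>
    simp only [KthAGo, KthOcc]
    by_cases hx : x = a
    · simp only [hx, if_true]
      by_cases hk : c + 1 = k
      · have h1 : (k - c - 1).toNat = 0 := by omega
        simp [hk, h1]
        omega
      · rw [if_neg hk, ih]
        by_cases hc : c < k
        · have hc1 : c + 1 < k := by omega
          have h2 : (k - c - 1).toNat = (k - (c + 1) - 1).toNat + 1 := by omega
          simp [hc, hc1, h2]
        · have hc1 : ¬ c + 1 < k := by omega
          simp [hc, hc1]
    · rw [if_neg hx, ih]
      simp [hx]

-- characterization of B via the same occurrence list
lemma KthAlt_eq (A : List Int) (a k : Int) :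
    KthAppearcance_alt A a k =
      if 1 ≤ k ∧ k ≤ (KthOcc A a 0).length
      then ((KthOcc A a 0)[(k - 1).toNat]?).getD (-1) else -1 := by
  fun_induction KthAppearcance_alt A a k with
  | case1 A k hguard =>
    rcases hguard with hk | hmem
    · rw [if_neg (by omega)]
    · rw [KthOcc_of_not_mem _ _ _ hmem]
      simp
  | case2 A k hguard hnone =>
    exfalso
    have hmem : a ∈ A := by tauto
    have := (PySem.List.index?_isSome_iff (xs := A) (v := a)).mpr hmem
    rw [hnone] at this
    simp at this
  | case3 A i hidx hguard =>
    rw [KthOcc_split A a i hidx]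
    simp
  | case4 A k hguard i hidx hk1 r hr ih =>
    simp only [r, ih] at hr
    rw [KthOcc_split A a i hidx, KthOcc_shift (A.drop (i + 1)) a ((i : Int) + 1)]
    set L := KthOcc (A.drop (i + 1)) a 0 with hL
    by_cases hin : 1 ≤ k - 1 ∧ k - 1 ≤ (L.length : Int)
    · exfalso
      rw [if_pos hin] at hr
      have hlt : (k - 1 - 1).toNat < L.length := by omega
      rw [List.getElem?_eq_getElem hlt] at hr
      have hge : (0 : Int) ≤ L[(k - 1 - 1).toNat] :=
        KthOcc_mem_ge _ _ _ _ (List.getElem_mem hlt)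
      simp only [Option.getD_some] at hr
      omega
    · have hcond : ¬ (1 ≤ k ∧ k ≤ ((((i : Int) :: L.map (· + ((i : Int) + 1))).length : Nat) : Int)) := by
        simp only [List.length_cons, List.length_map]
        push_cast
        omega
      rw [if_neg hcond]
  | case5 A k hguard i hidx hk1 r hr ih =>
    simp only [r, ih] at hr ⊢
    rw [KthOcc_split A a i hidx, KthOcc_shift (A.drop (i + 1)) a ((i : Int) + 1)]
    set L := KthOcc (A.drop (i + 1)) a 0 with hL
    by_cases hin : 1 ≤ k - 1 ∧ k - 1 ≤ (L.length : Int)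
    · rw [if_pos hin] at hr ⊢
      have hlt : (k - 1 - 1).toNat < L.length := by omega
      rw [List.getElem?_eq_getElem hlt]
      simp only [Option.getD_some]
      have hcond : 1 ≤ k ∧ k ≤ ((((i : Int) :: L.map (· + ((i : Int) + 1))).length : Nat) : Int) := by
        simp only [List.length_cons, List.length_map]
        push_cast
        omega
      rw [if_pos hcond]
      have hidx2 : (k - 1).toNat = (k - 1 - 1).toNat + 1 := by omega
      rw [hidx2]
      simp only [List.getElem?_cons_succ, List.getElem?_map,
        List.getElem?_eq_getElem hlt, Option.map_some, Option.getD_some]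
      ring
    · exfalso
      rw [if_neg hin] at hr
      exact hr rfl

-- ===== VERDICT (by name: the statement is the Claim_ definition above) =====
theorem KthAppearcance_spec : Claim_equal_KthAppearcance := by
  intro A a k _
  unfold Spec_KthAppearcance KthAppearcance
  rw [KthAGo_eq, KthAlt_eq]
  simp only [sub_zero]
  by_cases h1 : 1 ≤ k
  · have h0 : (0 : Int) < k := by omega
    by_cases h2 : k ≤ (KthOcc A a 0).length
    · simp [h0, h1, h2]
    · have hlen : (KthOcc A a 0).length ≤ k.toNat - 1 := by omega
      simp [h0, h1, h2, List.getElem?_eq_none hlen]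
  · have h0 : ¬ (0 : Int) < k := by omega
    simp only [h0, if_false]
    rw [if_neg (fun h => h1 h.1)]
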